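-- pv_equiv track=rewrite | github.com/borealBytes/my-farm-advisor-sandbox | skills/my-farm-advisor/soil/cdl-cropland/src/cdl_reporting.py | build_crop_rotation_outlook
-- ===== SOURCE A (Python) =====
-- from collections import Counter
--
-- def _predict_next_crop(crop_names: list[str], current_crop: str) -> tuple[str | None, str]:
--     if not crop_names:
--         return None, "none"
--     followers = [
--         crop_names[idx + 1]
--         for idx, crop_name in enumerate(crop_names[:-1])
--         if crop_name == current_crop and idx + 1 < len(crop_names)
--     ]
--     if not followers:
--         if len(crop_names) >= 2 and crop_names[-1] != crop_names[-2]: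
--             return crop_names[-2], "low"
--         return current_crop, "low"
--     counts = Counter(followers)
--     best_count = max(counts.values())
--     best_choices = sorted(name for name, count in counts.items() if count == best_count)
--     choice = best_choices[0]
--     confidence = "high" if best_count >= 2 else "medium"
--     return choice, confidence
--
-- def build_crop_rotation_outlook(crop_names: list[str]) -> dict[str, str]:
--     if not crop_names:
--         return {
--             "predicted_next_crop": "Unknown",
--             "predicted_following_crop": "Unknown",
--             "rotation_confidence": "none",
--             "rotation_outlook": "Insufficient crop history for a heuristic rotation outlook.",
--         }
--
--     current_crop = crop_names[-1]
--     next_crop, next_confidence = _predict_next_crop(crop_names, current_crop)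
--     following_crop, following_confidence = _predict_next_crop(
--         crop_names + ([next_crop] if next_crop else []), next_crop or current_crop
--     )
--     confidence_rank = {"none": 0, "low": 1, "medium": 2, "high": 3}
--     combined_confidence = min(
--         confidence_rank[next_confidence], confidence_rank[following_confidence]
--     )
--     confidence_label = next(
--         label for label, rank in confidence_rank.items() if rank == combined_confidence
--     )
--
--     next_label = next_crop or "Unknown"
--     following_label = following_crop or next_label
--     if confidence_label == "none":
--         outlook = "Insufficient crop history for a heuristic rotation outlook."
--     elif confidence_label == "low":
--         outlook = f"Heuristic outlook: {next_label} next, then {following_label}; confidence is low because the recent sequence is short or noisy."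
--     else:
--         outlook = f"Heuristic outlook: {next_label} next, then {following_label}, based on the recent rotation pattern."
--
--     return {
--         "predicted_next_crop": next_label,
--         "predicted_following_crop": following_label,
--         "rotation_confidence": confidence_label,
--         "rotation_outlook": outlook,
--     }
-- ===== SOURCE B (Python) =====
-- _RANK = {"none": 0, "low": 1, "medium": 2, "high": 3}
--
-- def _transition_table(crop_names):
--     table = {}
--     for prev, nxt in zip(crop_names, crop_names[1:]):
--         bucket = table.setdefault(prev, {})
--         bucket[nxt] = bucket.get(nxt, 0) + 1
--     return table
--
-- def _query(table, current, last, second):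
--     # second is history[-2] when the history has >= 2 entries, else None
--     counts = table.get(current, {})
--     if not counts:
--         if second is not None and last != second:
--             return second, "low"
--         return current, "low"
--     name, count = min(counts.items(), key=lambda kv: (-kv[1], kv[0]))
--     return name, ("high" if count >= 2 else "medium")
--
-- def build_crop_rotation_outlook(crop_names: list[str]) -> dict[str, str]:
--     if not crop_names:
--         return {
--             "predicted_next_crop": "Unknown",
--             "predicted_following_crop": "Unknown",
--             "rotation_confidence": "none",
--             "rotation_outlook": "Insufficient crop history for a heuristic rotation outlook.",
--         }
--
--     table = _transition_table(crop_names)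
--     current = crop_names[-1]
--     second = crop_names[-2] if len(crop_names) >= 2 else None
--
--     next_crop, next_conf = _query(table, current, current, second)
--     if next_crop:
--         # history + [next_crop]: one extra transition current -> next_crop
--         bucket = dict(table.get(current, {}))
--         bucket[next_crop] = bucket.get(next_crop, 0) + 1
--         table2 = dict(table)
--         table2[current] = bucket
--         following_crop, following_conf = _query(table2, next_crop, next_crop, current)
--     else:
--         following_crop, following_conf = _query(table, current, current, second)
--
--     confidence = next_conf if _RANK[next_conf] <= _RANK[following_conf] else following_conf
--     next_label = next_crop or "Unknown"
--     following_label = following_crop or next_label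
--     if confidence == "none":
--         outlook = "Insufficient crop history for a heuristic rotation outlook."
--     elif confidence == "low":
--         outlook = f"Heuristic outlook: {next_label} next, then {following_label}; confidence is low because the recent sequence is short or noisy."
--     else:
--         outlook = f"Heuristic outlook: {next_label} next, then {following_label}, based on the recent rotation pattern."
--
--     return {
--         "predicted_next_crop": next_label,
--         "predicted_following_crop": following_label,
--         "rotation_confidence": confidence,
--         "rotation_outlook": outlook,
--     }
-- ===== Notes on version B (the rewrite author's own statement) =====
-- stated objective: idiomatic
-- what changed: B builds a successor-count transition table once (dict of counters over zip(names, names[1:])) and answers both predictions by a table lookup plus a single min over the key (-count, name), instead of A's per-query rebuild of a followers list by enumerate/re-indexing followed by Counter + max + sorted tie-break; B also takes the combined confidence as the lower-ranked of the two labels directly instead of A's rank-dict round trip.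
import Mathlib
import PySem

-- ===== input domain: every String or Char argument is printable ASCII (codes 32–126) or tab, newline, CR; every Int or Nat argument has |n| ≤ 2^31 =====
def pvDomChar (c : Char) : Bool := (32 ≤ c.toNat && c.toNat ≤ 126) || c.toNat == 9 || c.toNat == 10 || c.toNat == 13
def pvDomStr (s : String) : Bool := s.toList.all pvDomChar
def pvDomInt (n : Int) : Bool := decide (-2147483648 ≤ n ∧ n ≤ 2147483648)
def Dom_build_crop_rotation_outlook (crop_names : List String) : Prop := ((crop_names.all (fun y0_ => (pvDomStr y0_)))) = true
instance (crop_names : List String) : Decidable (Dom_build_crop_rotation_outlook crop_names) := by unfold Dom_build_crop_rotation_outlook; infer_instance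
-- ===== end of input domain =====

-- B replaces A's per-query followers rescans by one transition table built once; return-value equivalence, no mutation involved.

-- ===== PORT A =====
-- _predict_next_crop, transliterated
def predictNextCrop (crop_names : List String) (current_crop : String) : Option String × String :=
  if crop_names = [] then (none, "none")
  else
    let followers : List String :=
      (PySem.List.enumerate (PySem.List.slice crop_names none (some (-1)))).filterMap
        (fun p => if p.2 == current_crop ∧ p.1 + 1 < (crop_names.length : Int)
                  then PySem.List.pyGet? crop_names (p.1 + 1) else none)
    if followers = [] then
      if 2 ≤ crop_names.length ∧
          PySem.List.pyGet? crop_names (-1) ≠ PySem.List.pyGet? crop_names (-2) then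
        (PySem.List.pyGet? crop_names (-2), "low")   -- index in range: length ≥ 2
      else (some current_crop, "low")
    else
      let counts := PySem.Dict.counter followers
      -- max(counts.values()): values is nonempty here (followers ≠ [])
      let best_count := (PySem.List.max? counts.values (fun v => v)).getD 0
      let best_choices := PySem.List.sorted
        (counts.items.filterMap (fun p => if p.2 == best_count then some p.1 else none))
        (fun x => x) false
      let confidence := if (2 : Int) ≤ best_count then "high" else "medium"
      (PySem.List.pyGet? best_choices 0, confidence)   -- best_choices nonempty here

def build_crop_rotation_outlook (crop_names : List String) : List (String × String) :=
  if crop_names = [] then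
    [("predicted_next_crop", "Unknown"), ("predicted_following_crop", "Unknown"),
     ("rotation_confidence", "none"),
     ("rotation_outlook", "Insufficient crop history for a heuristic rotation outlook.")]
  else
    let current_crop := (PySem.List.pyGet? crop_names (-1)).getD ""   -- in range: list nonempty
    let nc := predictNextCrop crop_names current_crop
    let aug := crop_names ++ (match nc.1 with
      | some s => if s == "" then [] else [s]
      | none => [])
    let cur2 := match nc.1 with
      | some s => if s == "" then current_crop else s
      | none => current_crop
    let fc := predictNextCrop aug cur2
    let confidence_rank : PySem.Dict String Int :=
      PySem.Dict.ofList [("none", 0), ("low", 1), ("medium", 2), ("high", 3)]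
    -- rank lookups: the produced confidence labels are always keys of the dict
    let combined := min (confidence_rank.getD nc.2 0) (confidence_rank.getD fc.2 0)
    -- next(...): always found, combined is one of the four ranks
    let confidence_label := ((confidence_rank.items.find? (fun p => p.2 == combined)).map (fun p => p.1)).getD ""
    let next_label := match nc.1 with
      | some s => if s == "" then "Unknown" else s
      | none => "Unknown"
    let following_label := match fc.1 with
      | some s => if s == "" then next_label else s
      | none => next_label
    let outlook :=
      if confidence_label == "none" then
        "Insufficient crop history for a heuristic rotation outlook."
      else if confidence_label == "low" then
        "Heuristic outlook: " ++ next_label ++ " next, then " ++ following_label ++ "; confidence is low because the recent sequence is short or noisy."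
      else
        "Heuristic outlook: " ++ next_label ++ " next, then " ++ following_label ++ ", based on the recent rotation pattern."
    [("predicted_next_crop", next_label), ("predicted_following_crop", following_label),
     ("rotation_confidence", confidence_label), ("rotation_outlook", outlook)]

-- ===== PORT B =====
def rankB : PySem.Dict String Int :=
  PySem.Dict.ofList [("none", 0), ("low", 1), ("medium", 2), ("high", 3)]

-- _transition_table, transliterated
def tableBStep (t : PySem.Dict String (PySem.Dict String Int)) (p : String × String) :
    PySem.Dict String (PySem.Dict String Int) :=
  let t' := t.setdefault p.1 PySem.Dict.empty
  let bucket := t'.getD p.1 PySem.Dict.empty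
  t'.insert p.1 (bucket.insert p.2 (bucket.getD p.2 0 + 1))

def tableB (crop_names : List String) : PySem.Dict String (PySem.Dict String Int) :=
  (crop_names.zip crop_names.tail).foldl tableBStep PySem.Dict.empty

-- _query, transliterated
def queryB (table : PySem.Dict String (PySem.Dict String Int))
    (current last : String) (second : Option String) : String × String :=
  let counts := table.getD current PySem.Dict.empty
  if counts.items = [] then
    match second with
    | some s => if last ≠ s then (s, "low") else (current, "low")
    | none => (current, "low")
  else
    match PySem.List.min2? counts.items (fun kv => -kv.2) (fun kv => kv.1) with
    | some m => (m.1, if (2 : Int) ≤ m.2 then "high" else "medium")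
    | none => (current, "low")   -- unreachable: counts.items ≠ []

def build_crop_rotation_outlook_alt (crop_names : List String) : List (String × String) :=
  if crop_names = [] then
    [("predicted_next_crop", "Unknown"), ("predicted_following_crop", "Unknown"),
     ("rotation_confidence", "none"),
     ("rotation_outlook", "Insufficient crop history for a heuristic rotation outlook.")]
  else
    let table := tableB crop_names
    let current := (PySem.List.pyGet? crop_names (-1)).getD ""   -- in range: list nonempty
    let second := if 2 ≤ crop_names.length then PySem.List.pyGet? crop_names (-2) else none
    let nq := queryB table current current second
    let fq :=
      if nq.1 ≠ "" then
        let bucket := table.getD current PySem.Dict.empty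
        queryB (table.insert current (bucket.insert nq.1 (bucket.getD nq.1 0 + 1)))
          nq.1 nq.1 (some current)
      else queryB table current current second
    -- _RANK lookups: produced labels are always keys
    let confidence := if rankB.getD nq.2 0 ≤ rankB.getD fq.2 0 then nq.2 else fq.2
    let next_label := if nq.1 == "" then "Unknown" else nq.1
    let following_label := if fq.1 == "" then next_label else fq.1
    let outlook :=
      if confidence == "none" then
        "Insufficient crop history for a heuristic rotation outlook."
      else if confidence == "low" then
        "Heuristic outlook: " ++ next_label ++ " next, then " ++ following_label ++ "; confidence is low because the recent sequence is short or noisy."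
      else
        "Heuristic outlook: " ++ next_label ++ " next, then " ++ following_label ++ ", based on the recent rotation pattern."
    [("predicted_next_crop", next_label), ("predicted_following_crop", following_label),
     ("rotation_confidence", confidence), ("rotation_outlook", outlook)]

-- ===== PRECONDITION & SPEC =====
def Spec_build_crop_rotation_outlook (crop_names : List String) (out : List (String × String)) : Prop := out = build_crop_rotation_outlook_alt crop_names
instance (crop_names : List String) (out : List (String × String)) : Decidable (Spec_build_crop_rotation_outlook crop_names out) := by unfold Spec_build_crop_rotation_outlook; infer_instance

-- ===== CLAIM (what is proved, stated in full; the proofs are below) =====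
def Claim_equal_build_crop_rotation_outlook : Prop := ∀ (crop_names : List String), Dom_build_crop_rotation_outlook crop_names → Spec_build_crop_rotation_outlook crop_names (build_crop_rotation_outlook crop_names)

-- ===== LEMMAS AND PROOFS =====

-- canonical followers list: successors of c among consecutive pairs
def Fol (cns : List String) (c : String) : List String :=
  ((cns.zip cns.tail).filter (fun p => p.1 == c)).map (fun p => p.2)

lemma fol_cons_cons (x y : String) (t : List String) (c : String) :
    Fol (x :: y :: t) c = (if x == c then [y] else []) ++ Fol (y :: t) c := by
  unfold Fol
  simp only [List.tail_cons, List.zip_cons_cons, List.filter_cons]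
  by_cases h : x == c <;> simp [h]

-- A's enumerate/index comprehension computes Fol
lemma follow_aux (full : List String) (c : String) :
    ∀ (m k : Nat), full.length ≤ k + m →
      (PySem.List.enumerate ((full.drop k).dropLast) (k : Int)).filterMap
        (fun p => if p.2 == c ∧ p.1 + 1 < (full.length : Int)
                  then PySem.List.pyGet? full (p.1 + 1) else none)
      = Fol (full.drop k) c := by
  intro m
  induction m with
  | zero =>
      intro k hk
      have h0 : full.drop k = [] := List.drop_eq_nil_of_le (by omega)
      simp [h0, Fol, PySem.List.enumerate_nil]
  | succ m ih =>
      intro k hk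
      cases h0 : full.drop k with
      | nil => simp [Fol, PySem.List.enumerate_nil]
      | cons x rest =>
        cases hr : rest with
        | nil => simp [Fol, PySem.List.enumerate_nil]
        | cons y t =>
          subst hr
          have hlen : k + 2 ≤ full.length := by
            have hld : (full.drop k).length = full.length - k := by simp
            rw [h0] at hld
            simp at hld
            omega
          have hdrop1 : full.drop (k + 1) = y :: t := by
            have h1 : (full.drop k).tail = full.drop (k + 1) := List.tail_drop ..
            rw [h0] at h1
            simpa using h1.symm
          have hlt : ((k : Int) + 1) < (full.length : Int) := by omega
          have hget : PySem.List.pyGet? full ((k : Int) + 1) = some y := by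
            have hc : ((k : Int) + 1) = ((k + 1 : Nat) : Int) := by push_cast; ring
            rw [hc, PySem.List.pyGet?_of_nonneg_of_lt full (by positivity)
              (by exact_mod_cast (by omega : k + 1 < full.length))]
            have h2 : full[(((k + 1 : Nat) : Int)).toNat]? = (full.drop (k + 1))[0]? := by
              rw [List.getElem?_drop]
              norm_num
            rw [h2, hdrop1]
            rfl
          have ihk := ih (k + 1) (by omega)
          rw [hdrop1] at ihk
          push_cast at ihk
          rw [show (x :: y :: t).dropLast = x :: (y :: t).dropLast from rfl,
              PySem.List.enumerate_cons]
          simp only [List.filterMap_cons]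
          by_cases hx : x == c
          · rw [if_pos ⟨hx, hlt⟩, hget, ihk, fol_cons_cons, if_pos hx]
            rfl
          · rw [if_neg (fun hh => hx hh.1), ihk, fol_cons_cons, if_neg hx]
            rfl

lemma follow (cns : List String) (c : String) :
    (PySem.List.enumerate (PySem.List.slice cns none (some (-1)))).filterMap
      (fun p => if p.2 == c ∧ p.1 + 1 < (cns.length : Int)
                then PySem.List.pyGet? cns (p.1 + 1) else none)
    = Fol cns c := by
  have h := follow_aux cns c cns.length 0 (by omega)
  simpa [PySem.List.slice_to_neg_one] using h

-- B's table step, setdefault eliminated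
lemma tableBStep_eq (t : PySem.Dict String (PySem.Dict String Int)) (p : String × String) :
    tableBStep t p =
      t.insert p.1 ((t.getD p.1 PySem.Dict.empty).insert p.2
        ((t.getD p.1 PySem.Dict.empty).getD p.2 0 + 1)) := by
  unfold tableBStep
  dsimp only
  rw [PySem.Dict.getD_setdefault_self]
  by_cases h : t.contains p.1
  · rw [PySem.Dict.setdefault_of_contains t _ h]
  · rw [PySem.Dict.setdefault_of_not_contains t _ (by simpa using h),
        PySem.Dict.insert_insert_self]

lemma tab_aux (c : String) :
    ∀ (pairs : List (String × String)) (t : PySem.Dict String (PySem.Dict String Int)),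
      ((pairs.foldl tableBStep t).getD c PySem.Dict.empty)
      = ((pairs.filter (fun p => p.1 == c)).map (fun p => p.2)).foldl
          (fun d x => d.insert x (d.getD x 0 + 1)) (t.getD c PySem.Dict.empty) := by
  intro pairs
  induction pairs with
  | nil => intro t; simp
  | cons p rest ih =>
      intro t
      rw [List.foldl_cons]
      simp only [List.filter_cons]
      rw [ih]
      by_cases hp : (p.1 == c) = true
      · have hpc : p.1 = c := by simpa using hp
        rw [if_pos hp, List.map_cons, List.foldl_cons]
        congr 1
        rw [tableBStep_eq, hpc, PySem.Dict.getD_insert_self]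
      · rw [if_neg hp]
        congr 1
        rw [tableBStep_eq, PySem.Dict.getD_insert,
            if_neg (show c ≠ p.1 from fun hcc => hp (by simp [hcc]))]

lemma tab (cns : List String) (c : String) :
    (tableB cns).getD c PySem.Dict.empty = PySem.Dict.counter (Fol cns c) := by
  unfold tableB
  rw [tab_aux]
  rw [show (PySem.Dict.empty : PySem.Dict String (PySem.Dict String Int)).getD c PySem.Dict.empty
      = PySem.Dict.empty from rfl]
  exact PySem.Dict.foldl_insert_getD_add_one_eq_counter _

-- lexicographic minimality predicate for min2?
def LexMin {α : Type} (k1 : α → Int) (k2 : α → String) (m y : α) : Prop :=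
  k1 m < k1 y ∨ (k1 m = k1 y ∧ k2 m ≤ k2 y)

lemma lexmin_refl {α : Type} (k1 : α → Int) (k2 : α → String) (m : α) : LexMin k1 k2 m m := by
  right; exact ⟨rfl, le_refl _⟩

lemma lexmin_trans {α : Type} (k1 : α → Int) (k2 : α → String) {a b c : α}
    (h1 : LexMin k1 k2 a b) (h2 : LexMin k1 k2 b c) : LexMin k1 k2 a c := by
  rcases h1 with h1 | ⟨e1, l1⟩
  · rcases h2 with h2 | ⟨e2, _⟩
    · left; omega
    · left; omega
  · rcases h2 with h2 | ⟨e2, l2⟩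
    · left; omega
    · right; exact ⟨by omega, le_trans l1 l2⟩

lemma min2_aux {α : Type} (k1 : α → Int) (k2 : α → String) :
    ∀ (t : List α) (m0 : α),
      ∃ m, (t.foldl (fun acc x =>
              match acc with
              | none => some x
              | some m =>
                if (decide (k1 x < k1 m) || !decide (k1 m < k1 x) && decide (k2 x < k2 m)) = true
                then some x else some m) (some m0)) = some m
        ∧ (m = m0 ∨ m ∈ t) ∧ LexMin k1 k2 m m0 ∧ ∀ y ∈ t, LexMin k1 k2 m y := by
  intro t
  induction t with
  | nil =>
      intro m0
      exact ⟨m0, rfl, Or.inl rfl, lexmin_refl .., by simp⟩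
  | cons x rest ih =>
      intro m0
      rw [List.foldl_cons]
      dsimp only
      by_cases hcond : (decide (k1 x < k1 m0) || !decide (k1 m0 < k1 x) && decide (k2 x < k2 m0)) = true
      · rw [if_pos hcond]
        obtain ⟨m, hfold, hmem, hm0, hall⟩ := ih x
        have hxm0 : LexMin k1 k2 x m0 := by
          simp only [Bool.or_eq_true, Bool.and_eq_true, Bool.not_eq_true', decide_eq_true_eq,
            decide_eq_false_iff_not] at hcond
          rcases hcond with hlt | ⟨hnlt, hk2⟩
          · left; exact hlt
          · by_cases hcase : k1 x < k1 m0
            · left; exact hcase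
            · right; exact ⟨le_antisymm (not_lt.mp hnlt) (not_lt.mp hcase), le_of_lt hk2⟩
        refine ⟨m, hfold, ?_, lexmin_trans k1 k2 hm0 hxm0, ?_⟩
        · rcases hmem with h | h
          · right; rw [h]; exact List.mem_cons_self ..
          · right; exact List.mem_cons_of_mem _ h
        · intro y hy
          rcases List.mem_cons.mp hy with rfl | hy
          · exact hm0
          · exact hall y hy
      · rw [if_neg hcond]
        obtain ⟨m, hfold, hmem, hm0, hall⟩ := ih m0
        have hm0x : LexMin k1 k2 m0 x := by
          have hcond' : ¬ (k1 x < k1 m0 ∨ (¬ k1 m0 < k1 x ∧ k2 x < k2 m0)) := by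
            simpa [Bool.or_eq_true, Bool.and_eq_true, Bool.not_eq_true', decide_eq_true_eq,
              decide_eq_false_iff_not] using hcond
          push_neg at hcond'
          obtain ⟨h1, h2⟩ := hcond'
          by_cases hcase : k1 m0 < k1 x
          · left; exact hcase
          · right
            have hxle : k1 x ≤ k1 m0 := not_lt.mp hcase
            exact ⟨le_antisymm h1 hxle, h2 hxle⟩
        refine ⟨m, hfold, ?_, hm0, ?_⟩
        · rcases hmem with h | h
          · left; exact h
          · right; exact List.mem_cons_of_mem _ h
        · intro y hy
          rcases List.mem_cons.mp hy with rfl | hy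
          · exact lexmin_trans k1 k2 hm0 hm0x
          · exact hall y hy

lemma min2_spec (k1 : String × Int → Int) (k2 : String × Int → String)
    (x : String × Int) (rest : List (String × Int)) :
    ∃ m, PySem.List.min2? (x :: rest) k1 k2 = some m ∧ m ∈ x :: rest ∧
      ∀ y ∈ x :: rest, LexMin k1 k2 m y := by
  obtain ⟨m, hfold, hmem, hm0, hall⟩ := min2_aux k1 k2 rest x
  refine ⟨m, ?_, ?_, ?_⟩
  · simpa [PySem.List.min2?] using hfold
  · rcases hmem with h | h
    · rw [h]; exact List.mem_cons_self ..
    · exact List.mem_cons_of_mem _ h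
  · intro y hy
    rcases List.mem_cons.mp hy with rfl | hy
    · exact hm0
    · exact hall y hy

-- the selection of A (Counter/max/sorted/[0]) and of B (min over (-count, name)) agree
lemma select (xs : List String) (hx : xs ≠ []) :
    ∃ (best : Int) (m : String),
      PySem.List.max? (PySem.Dict.counter xs).values (fun v => v) = some best ∧
      PySem.List.min2? (PySem.Dict.counter xs).items (fun kv => -kv.2) (fun kv => kv.1)
        = some (m, best) ∧
      PySem.List.pyGet? (PySem.List.sorted
        ((PySem.Dict.counter xs).items.filterMap
          (fun p => if p.2 == best then some p.1 else none)) (fun x => x) false) 0 = some m := by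
  classical
  obtain ⟨z, zs, hzz⟩ : ∃ z zs, xs = z :: zs := by
    cases xs with
    | nil => exact absurd rfl hx
    | cons z zs => exact ⟨z, zs, rfl⟩
  have hitems_ne : (PySem.Dict.counter xs).items ≠ [] := by
    rw [PySem.Dict.items_counter]
    intro h
    have hz : z ∈ PySem.Set.ofList xs := (PySem.Set.mem_ofList xs z).mpr (by simp [hzz])
    have hmem : (z, ((xs.count z : Int))) ∈
        (PySem.Set.ofList xs).map (fun k => (k, ((xs.count k : Int)))) :=
      List.mem_map_of_mem hz
    rw [h] at hmem
    simp at hmem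
  have hvals_ne : (PySem.Dict.counter xs).values ≠ [] := by
    intro h
    apply hitems_ne
    unfold PySem.Dict.values at h
    simpa using h
  obtain ⟨best, hbest⟩ : ∃ best,
      PySem.List.max? (PySem.Dict.counter xs).values (fun v => v) = some best := by
    cases h : PySem.List.max? (PySem.Dict.counter xs).values (fun v => v) with
    | none => exact absurd ((PySem.List.max?_eq_none_iff _ _).mp h) hvals_ne
    | some b => exact ⟨b, rfl⟩
  have hle : ∀ p ∈ (PySem.Dict.counter xs).items, p.2 ≤ best := by
    intro p hp
    have hv : p.2 ∈ (PySem.Dict.counter xs).values := by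
      unfold PySem.Dict.values
      exact List.mem_map_of_mem hp
    exact PySem.List.max?_isMax hbest _ hv
  obtain ⟨p0, hp0mem, hp0⟩ : ∃ p ∈ (PySem.Dict.counter xs).items, p.2 = best := by
    have hmem := PySem.List.max?_mem hbest
    unfold PySem.Dict.values at hmem
    obtain ⟨p, hp, hpe⟩ := List.mem_map.mp hmem
    exact ⟨p, hp, hpe⟩
  obtain ⟨i0, irest, hidec⟩ : ∃ i0 irest, (PySem.Dict.counter xs).items = i0 :: irest := by
    cases h : (PySem.Dict.counter xs).items with
    | nil => exact absurd h hitems_ne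
    | cons a b => exact ⟨a, b, rfl⟩
  obtain ⟨mp, hmp, hmpmem, hmpall⟩ := min2_spec (fun kv => -kv.2) (fun kv => kv.1) i0 irest
  rw [← hidec] at hmp hmpmem hmpall
  have hmp2 : mp.2 = best := by
    have h2 := hle mp hmpmem
    have h1 := hmpall p0 hp0mem
    simp only [LexMin] at h1
    rcases h1 with h | ⟨h, _⟩
    · omega
    · omega
  set S := (PySem.Dict.counter xs).items.filterMap
      (fun p => if p.2 == best then some p.1 else none) with hS
  have hmpS : mp.1 ∈ S := by
    rw [hS]
    exact List.mem_filterMap.mpr ⟨mp, hmpmem, by simp [hmp2]⟩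
  have hSne : S ≠ [] := List.ne_nil_of_mem hmpS
  obtain ⟨m, ts, hsorted⟩ : ∃ m ts,
      PySem.List.sorted S (fun x => x) false = m :: ts := by
    cases h : PySem.List.sorted S (fun x => x) false with
    | nil => exact absurd ((PySem.List.sorted_eq_nil_iff _ _ _).mp h) hSne
    | cons a b => exact ⟨a, b, rfl⟩
  have hmS : m ∈ S := by
    have hm : m ∈ PySem.List.sorted S (fun x => x) false := by simp [hsorted]
    exact (PySem.List.sorted_perm S (fun x => x) false).subset hm
  have hmin : ∀ y ∈ S, m ≤ y := PySem.List.key_head_sorted_le S (fun x => x) hsorted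
  have hmpair : (m, best) ∈ (PySem.Dict.counter xs).items := by
    rw [hS] at hmS
    obtain ⟨q, hq, hqe⟩ := List.mem_filterMap.mp hmS
    by_cases h : (q.2 == best) = true
    · rw [if_pos h] at hqe
      have hq2 : q.2 = best := by simpa using h
      have hq1 : q.1 = m := by simpa using hqe
      have hqq : q = (m, best) := by
        obtain ⟨a, b⟩ := q
        simp only [Prod.mk.injEq]
        exact ⟨hq1, hq2⟩
      rwa [hqq] at hq
    · rw [if_neg h] at hqe
      exact absurd hqe (by simp)
  have hmle : mp.1 ≤ m := by
    have h := hmpall (m, best) hmpair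
    simp only [LexMin] at h
    rcases h with h | ⟨_, h⟩
    · exfalso; omega
    · exact h
  have hmeq : mp.1 = m := le_antisymm hmle (hmin mp.1 hmpS)
  refine ⟨best, m, hbest, ?_, ?_⟩
  · rw [hmp]
    have hmp' : mp = (m, best) := by
      obtain ⟨a, b⟩ := mp
      simp only [Prod.mk.injEq]
      exact ⟨hmeq, hmp2⟩
    rw [hmp']
  · rw [hsorted, PySem.List.pyGet?_zero]
    rfl

-- queryB's confidence is one of the three non-"none" labels
lemma qconf (table : PySem.Dict String (PySem.Dict String Int))
    (current last : String) (second : Option String) :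
    (queryB table current last second).2 = "low" ∨
    (queryB table current last second).2 = "medium" ∨
    (queryB table current last second).2 = "high" := by
  unfold queryB
  dsimp only
  split
  · split
    · split <;> simp
    · simp
  · split
    · split <;> simp
    · simp

-- A's rank/label round trip equals B's direct pick of the lower-ranked label
lemma label_eq (c1 c2 : String)
    (h1 : c1 = "low" ∨ c1 = "medium" ∨ c1 = "high")
    (h2 : c2 = "low" ∨ c2 = "medium" ∨ c2 = "high") :
    (((PySem.Dict.ofList [("none", (0:Int)), ("low", 1), ("medium", 2), ("high", 3)]).items.find?
        (fun p => p.2 == min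
          ((PySem.Dict.ofList [("none", (0:Int)), ("low", 1), ("medium", 2), ("high", 3)]).getD c1 0)
          ((PySem.Dict.ofList [("none", (0:Int)), ("low", 1), ("medium", 2), ("high", 3)]).getD c2 0))).map
      (fun p => p.1)).getD ""
    = if rankB.getD c1 0 ≤ rankB.getD c2 0 then c1 else c2 := by
  rcases h1 with rfl | rfl | rfl <;> rcases h2 with rfl | rfl | rfl <;> decide

-- consecutive pairs of an appended element
lemma zip_tail_append (x : String) :
    ∀ (l : List String), l ≠ [] →
      (l ++ [x]).zip ((l ++ [x]).tail)
      = l.zip l.tail ++ [(l.getLast?.getD "", x)] := by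
  intro l
  induction l with
  | nil => intro h; exact absurd rfl h
  | cons a rest ih =>
      intro _
      cases rest with
      | nil => simp
      | cons b t =>
          have hih := ih (by simp)
          simp only [List.cons_append, List.tail_cons, List.zip_cons_cons] at hih ⊢
          rw [hih, List.getLast?_cons_cons]

-- A's _predict_next_crop equals B's _query over the transition table
lemma pred (cns : List String) (h : cns ≠ []) (c : String) :
    predictNextCrop cns c =
      (some (queryB (tableB cns) c ((PySem.List.pyGet? cns (-1)).getD "")
          (if 2 ≤ cns.length then PySem.List.pyGet? cns (-2) else none)).1,
       (queryB (tableB cns) c ((PySem.List.pyGet? cns (-1)).getD "")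
          (if 2 ≤ cns.length then PySem.List.pyGet? cns (-2) else none)).2) := by
  have hfol := follow cns c
  have htab := tab cns c
  unfold predictNextCrop queryB
  rw [if_neg h]
  dsimp only
  rw [hfol, htab]
  have hsome : cns.getLast?.isSome := List.getLast?_isSome.mpr h
  obtain ⟨l, hl'⟩ := Option.isSome_iff_exists.mp hsome
  have hl : PySem.List.pyGet? cns (-1) = some l := by
    rw [PySem.List.pyGet?_neg_one]; exact hl'
  by_cases hF : Fol cns c = []
  · rw [if_pos hF]
    have hcnt : (PySem.Dict.counter (Fol cns c)).items = [] := by rw [hF]; rfl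
    rw [if_pos hcnt]
    by_cases h2 : 2 ≤ cns.length
    · obtain ⟨s2, hs2⟩ : ∃ s2, PySem.List.pyGet? cns (-2) = some s2 := by
        rw [PySem.List.pyGet?_neg_ofNat cns 2 (by norm_num) h2]
        exact ⟨_, List.getElem?_eq_getElem (by omega)⟩
      rw [if_pos h2, hs2, hl]
      simp only [Option.getD_some]
      by_cases hne : l = s2
      · have hcA : ¬ (2 ≤ cns.length ∧ (some l : Option String) ≠ some s2) := by
          intro hh; exact hh.2 (by rw [hne])
        rw [if_neg hcA]
        rw [if_neg (by simpa using hne)]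
      · rw [if_pos ⟨h2, by simpa using hne⟩]
        rw [if_pos (by simpa using hne)]
    · rw [if_neg h2, hl]
      rw [if_neg (fun hh => h2 hh.1)]
  · rw [if_neg hF]
    have hcnt : (PySem.Dict.counter (Fol cns c)).items ≠ [] := by
      obtain ⟨z, zs, hzz⟩ : ∃ z zs, Fol cns c = z :: zs := by
        cases hzf : Fol cns c with
        | nil => exact absurd hzf hF
        | cons a b => exact ⟨a, b, rfl⟩
      rw [PySem.Dict.items_counter]
      intro hmape
      have hz : z ∈ PySem.Set.ofList (Fol cns c) :=
        (PySem.Set.mem_ofList _ z).mpr (by simp [hzz])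
      have hmz := List.mem_map_of_mem (f := fun k => (k, (((Fol cns c).count k : Int)))) hz
      rw [hmape] at hmz
      simp at hmz
    rw [if_neg hcnt]
    obtain ⟨best, m, hbest, hmin2, hget0⟩ := select (Fol cns c) hF
    rw [hbest, hmin2]
    simp only [Option.getD_some]
    exact Prod.ext_iff.mpr ⟨hget0, rfl⟩

-- ===== VERDICT (by name: the statement is the Claim_ definition above) =====
theorem build_crop_rotation_outlook_spec : Claim_equal_build_crop_rotation_outlook := by
  intro cns _
  unfold Spec_build_crop_rotation_outlook
  by_cases hc : cns = []
  · subst hc; rfl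
  · unfold build_crop_rotation_outlook build_crop_rotation_outlook_alt
    rw [if_neg hc, if_neg hc]
    dsimp only
    have hsome : cns.getLast?.isSome := List.getLast?_isSome.mpr hc
    obtain ⟨l, hl'⟩ := Option.isSome_iff_exists.mp hsome
    have hl : PySem.List.pyGet? cns (-1) = some l := by
      rw [PySem.List.pyGet?_neg_one]; exact hl'
    have hpred1 := pred cns hc l
    simp only [hl, Option.getD_some] at hpred1 ⊢
    have hconf1 := qconf (tableB cns) l l
      (if 2 ≤ cns.length then PySem.List.pyGet? cns (-2) else none)
    rw [hpred1]
    dsimp only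
    set q := queryB (tableB cns) l l
      (if 2 ≤ cns.length then PySem.List.pyGet? cns (-2) else none) with hqdef
    by_cases hq1 : q.1 = ""
    · have hq1b : (q.1 == "") = true := by simp [hq1]
      simp only [if_pos hq1b, if_neg (show ¬ (q.1 ≠ "") from fun hh => hh hq1),
        List.append_nil]
      rw [hpred1]
      dsimp only
      simp only [if_pos hq1b]
      rw [label_eq q.2 q.2 hconf1 hconf1]
    · have hq1b : ¬ ((q.1 == "") = true) := by simpa using hq1
      simp only [if_neg hq1b, if_pos hq1]
      have hne2 : cns ++ [q.1] ≠ [] := by simp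
      have hpred2 := pred (cns ++ [q.1]) hne2 q.1
      have hL : PySem.List.pyGet? (cns ++ [q.1]) (-1) = some q.1 :=
        PySem.List.pyGet?_neg_one_append_singleton ..
      have hlen1 : 1 ≤ cns.length := List.length_pos_of_ne_nil hc
      have hS : (if 2 ≤ (cns ++ [q.1]).length
            then PySem.List.pyGet? (cns ++ [q.1]) (-2) else none) = some l := by
        rw [if_pos (show 2 ≤ (cns ++ [q.1]).length by simp; omega)]
        rw [PySem.List.pyGet?_neg_ofNat (cns ++ [q.1]) 2 (by norm_num) (by simp; omega)]
        have hidx : (cns ++ [q.1]).length - 2 = cns.length - 1 := by simp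
        rw [hidx, List.getElem?_append_left (by omega), ← List.getLast?_eq_getElem?]
        exact hl'
      have hT : tableB (cns ++ [q.1])
          = (tableB cns).insert l (((tableB cns).getD l PySem.Dict.empty).insert q.1
              (((tableB cns).getD l PySem.Dict.empty).getD q.1 0 + 1)) := by
        unfold tableB
        rw [zip_tail_append q.1 cns hc, List.foldl_append,
            show cns.getLast?.getD "" = l by rw [hl', Option.getD_some],
            List.foldl_cons, List.foldl_nil, tableBStep_eq]
      rw [hL, hS, hT] at hpred2
      simp only [Option.getD_some] at hpred2
      have hconf2 := qconf ((tableB cns).insert l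
          (((tableB cns).getD l PySem.Dict.empty).insert q.1
            (((tableB cns).getD l PySem.Dict.empty).getD q.1 0 + 1))) q.1 q.1 (some l)
      rw [hpred2]
      dsimp only
      rw [label_eq q.2 _ hconf1 hconf2]
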